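-- pv_equiv track=rewrite | github.com/Axionis47/vllm-benchmark | bench/prompts/templates.py | get_synthetic_prompts
-- ===== SOURCE A (Python) =====
-- SHORT_PROMPTS = [
--     "Explain what machine learning is in simple terms.",
--     "Write a haiku about programming.",
--     "What are the three laws of thermodynamics?",
--     "Summarize the plot of Romeo and Juliet in one paragraph.",
--     "List five benefits of regular exercise.",
-- ]
--
-- MEDIUM_PROMPTS = [
--     """You are an expert software engineer. Please review the following code and
--     suggest improvements for readability, performance, and best practices:
--
--     def fibonacci(n):
--         if n <= 1:
--             return n
--         else:
--             return fibonacci(n-1) + fibonacci(n-2)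
--
--     Provide your suggestions in a numbered list format.""",
--
--     """Write a detailed explanation of how neural networks work, covering:
--     1. The basic structure of a neural network
--     2. How forward propagation works
--     3. The role of activation functions
--     4. How backpropagation updates weights
--     Please make this accessible to someone with basic programming knowledge.""",
--
--     """Compare and contrast three popular programming languages: Python, Rust, and Go.
--     For each language, discuss:
--     - Primary use cases
--     - Performance characteristics
--     - Learning curve
--     - Ecosystem and community support
--     Conclude with recommendations for when to use each.""",
-- ]
--
-- LONG_PROMPTS = [
--     """You are a senior technical architect at a Fortune 500 company. Your team is
--     building a new microservices-based e-commerce platform that needs to handle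
--     Black Friday-level traffic (approximately 100,000 concurrent users with
--     50,000 transactions per minute).
--
--     Current stack considerations:
--     - The team has experience with Python, Java, and Go
--     - You have budget for cloud infrastructure (AWS or GCP)
--     - The system needs to be highly available (99.99% uptime SLA)
--     - Data consistency is critical for inventory management
--     - The platform must support real-time inventory updates across multiple warehouses
--     - Customer data must be GDPR and CCPA compliant
--
--     Please provide a detailed technical architecture proposal including:
--     1. Service decomposition strategy
--     2. Database choices (SQL vs NoSQL, specific recommendations)
--     3. Message queue and event streaming approach
--     4. Caching strategy
--     5. Load balancing and auto-scaling configuration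
--     6. Disaster recovery and backup approach
--     7. Monitoring and observability stack
--     8. Security considerations
--
--     For each component, explain your reasoning and any trade-offs involved.""",
-- ]
--
-- def get_synthetic_prompts(
--     short_count: int = 5,
--     medium_count: int = 3,
--     long_count: int = 1,
-- ) -> list[str]:
--     """Get a list of synthetic prompts for benchmarking.
--
--     Args:
--         short_count: Number of short prompts to include
--         medium_count: Number of medium prompts to include
--         long_count: Number of long prompts to include
--
--     Returns:
--         List of prompts mixed from different length buckets
--     """
--     prompts: list[str] = []
--
--     # Cycle through each category
--     for i in range(short_count):
--         prompts.append(SHORT_PROMPTS[i % len(SHORT_PROMPTS)])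
--
--     for i in range(medium_count):
--         prompts.append(MEDIUM_PROMPTS[i % len(MEDIUM_PROMPTS)])
--
--     for i in range(long_count):
--         prompts.append(LONG_PROMPTS[i % len(LONG_PROMPTS)])
--
--     return prompts
-- ===== SOURCE B (Python) =====
-- SHORT_PROMPTS = [
--     "Explain what machine learning is in simple terms.",
--     "Write a haiku about programming.",
--     "What are the three laws of thermodynamics?",
--     "Summarize the plot of Romeo and Juliet in one paragraph.",
--     "List five benefits of regular exercise.",
-- ]
--
-- MEDIUM_PROMPTS = [
--     """You are an expert software engineer. Please review the following code and
--     suggest improvements for readability, performance, and best practices: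
--
--     def fibonacci(n):
--         if n <= 1:
--             return n
--         else:
--             return fibonacci(n-1) + fibonacci(n-2)
--
--     Provide your suggestions in a numbered list format.""",
--
--     """Write a detailed explanation of how neural networks work, covering:
--     1. The basic structure of a neural network
--     2. How forward propagation works
--     3. The role of activation functions
--     4. How backpropagation updates weights
--     Please make this accessible to someone with basic programming knowledge.""",
--
--     """Compare and contrast three popular programming languages: Python, Rust, and Go.
--     For each language, discuss:
--     - Primary use cases
--     - Performance characteristics
--     - Learning curve
--     - Ecosystem and community support
--     Conclude with recommendations for when to use each.""",
-- ]
--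
-- LONG_PROMPTS = [
--     """You are a senior technical architect at a Fortune 500 company. Your team is
--     building a new microservices-based e-commerce platform that needs to handle
--     Black Friday-level traffic (approximately 100,000 concurrent users with
--     50,000 transactions per minute).
--
--     Current stack considerations:
--     - The team has experience with Python, Java, and Go
--     - You have budget for cloud infrastructure (AWS or GCP)
--     - The system needs to be highly available (99.99% uptime SLA)
--     - Data consistency is critical for inventory management
--     - The platform must support real-time inventory updates across multiple warehouses
--     - Customer data must be GDPR and CCPA compliant
--
--     Please provide a detailed technical architecture proposal including:
--     1. Service decomposition strategy
--     2. Database choices (SQL vs NoSQL, specific recommendations)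
--     3. Message queue and event streaming approach
--     4. Caching strategy
--     5. Load balancing and auto-scaling configuration
--     6. Disaster recovery and backup approach
--     7. Monitoring and observability stack
--     8. Security considerations
--
--     For each component, explain your reasoning and any trade-offs involved.""",
-- ]
--
--
-- def _fill(pool: list[str], count: int) -> list[str]:
--     """Fill a section in whole-pool chunks, then a prefix for the remainder.
--
--     No per-element indexing: append the complete pool while it still fits
--     entirely, then top up with a prefix slice of the pool.
--     """
--     out: list[str] = []
--     while len(out) + len(pool) <= count:
--         out += pool
--     remainder = count - len(out)
--     if remainder > 0:
--         out += pool[:remainder]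
--     return out
--
--
-- def get_synthetic_prompts(
--     short_count: int = 5,
--     medium_count: int = 3,
--     long_count: int = 1,
-- ) -> list[str]:
--     """Get a list of synthetic prompts for benchmarking (chunk-fill version)."""
--     return (
--         _fill(SHORT_PROMPTS, short_count)
--         + _fill(MEDIUM_PROMPTS, medium_count)
--         + _fill(LONG_PROMPTS, long_count)
--     )
-- ===== Notes on version B (the rewrite author's own statement) =====
-- stated objective: alternative
-- what changed: Replaces A's per-element loops with modulo indexing by a chunk-fill: each section is built by appending the whole pool while it still fits entirely, then topping up with one prefix slice of the pool (no modulo, no per-element index).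
import Mathlib
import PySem

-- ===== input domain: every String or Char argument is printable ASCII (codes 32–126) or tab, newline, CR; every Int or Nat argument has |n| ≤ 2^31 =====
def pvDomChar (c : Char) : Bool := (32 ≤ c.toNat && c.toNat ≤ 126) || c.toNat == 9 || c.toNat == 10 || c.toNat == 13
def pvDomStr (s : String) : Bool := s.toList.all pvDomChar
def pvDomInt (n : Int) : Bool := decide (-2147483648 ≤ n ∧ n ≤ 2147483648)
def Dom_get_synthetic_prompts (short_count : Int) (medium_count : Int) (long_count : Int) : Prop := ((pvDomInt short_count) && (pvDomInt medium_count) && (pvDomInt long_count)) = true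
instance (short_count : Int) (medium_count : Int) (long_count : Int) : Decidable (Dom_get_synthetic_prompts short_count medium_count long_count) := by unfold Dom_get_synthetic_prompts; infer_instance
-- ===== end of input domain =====

-- ===== PORT A =====
-- B fills each section in whole-pool chunks plus one prefix slice instead of A's per-element modulo loop (objective: alternative).
def SHORT_PROMPTS : List String := [
  "Explain what machine learning is in simple terms.",
  "Write a haiku about programming.",
  "What are the three laws of thermodynamics?",
  "Summarize the plot of Romeo and Juliet in one paragraph.",
  "List five benefits of regular exercise."
]

def MEDIUM_PROMPTS : List String := [
  "You are an expert software engineer. Please review the following code and\n    suggest improvements for readability, performance, and best practices:\n\n    def fibonacci(n):\n        if n <= 1:\n            return n\n        else:\n            return fibonacci(n-1) + fibonacci(n-2)\n\n    Provide your suggestions in a numbered list format.",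
  "Write a detailed explanation of how neural networks work, covering:\n    1. The basic structure of a neural network\n    2. How forward propagation works\n    3. The role of activation functions\n    4. How backpropagation updates weights\n    Please make this accessible to someone with basic programming knowledge.",
  "Compare and contrast three popular programming languages: Python, Rust, and Go.\n    For each language, discuss:\n    - Primary use cases\n    - Performance characteristics\n    - Learning curve\n    - Ecosystem and community support\n    Conclude with recommendations for when to use each."
]

def LONG_PROMPTS : List String := [
  "You are a senior technical architect at a Fortune 500 company. Your team is\n    building a new microservices-based e-commerce platform that needs to handle\n    Black Friday-level traffic (approximately 100,000 concurrent users with\n    50,000 transactions per minute).\n\n    Current stack considerations:\n    - The team has experience with Python, Java, and Go\n    - You have budget for cloud infrastructure (AWS or GCP)\n    - The system needs to be highly available (99.99% uptime SLA)\n    - Data consistency is critical for inventory management\n    - The platform must support real-time inventory updates across multiple warehouses\n    - Customer data must be GDPR and CCPA compliant\n\n    Please provide a detailed technical architecture proposal including:\n    1. Service decomposition strategy\n    2. Database choices (SQL vs NoSQL, specific recommendations)\n    3. Message queue and event streaming approach\n    4. Caching strategy\n    5. Load balancing and auto-scaling configuration\n    6. Disaster recovery and backup approach\n    7. Monitoring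 and observability stack\n    8. Security considerations\n\n    For each component, explain your reasoning and any trade-offs involved."
]

def get_synthetic_prompts (short_count : Int) (medium_count : Int) (long_count : Int) : List String :=
  let prompts : List String := []
  let prompts := (PySem.List.pyRange 0 short_count 1).foldl
    (fun acc i => acc ++ [PySem.List.pyGetD SHORT_PROMPTS (PySem.Int.mod i (PySem.List.len SHORT_PROMPTS)) ""]) prompts
  let prompts := (PySem.List.pyRange 0 medium_count 1).foldl
    (fun acc i => acc ++ [PySem.List.pyGetD MEDIUM_PROMPTS (PySem.Int.mod i (PySem.List.len MEDIUM_PROMPTS)) ""]) prompts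
  let prompts := (PySem.List.pyRange 0 long_count 1).foldl
    (fun acc i => acc ++ [PySem.List.pyGetD LONG_PROMPTS (PySem.Int.mod i (PySem.List.len LONG_PROMPTS)) ""]) prompts
  prompts

-- ===== PORT B =====
-- the while loop of Source B's _fill; hp only justifies termination (B's pools are the nonempty literals)
def pyFill (pool : List String) (hp : pool ≠ []) (count : Int) (out : List String) : List String :=
  if (out.length : Int) + (pool.length : Int) ≤ count then
    pyFill pool hp count (out ++ pool)
  else
    if 0 < count - (out.length : Int) then
      out ++ PySem.List.slice pool none (some (count - (out.length : Int)))
    else out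
termination_by (count - (out.length : Int)).toNat
decreasing_by
  have hL : 0 < pool.length := List.length_pos_of_ne_nil hp
  simp only [List.length_append]
  omega

def get_synthetic_prompts_alt (short_count : Int) (medium_count : Int) (long_count : Int) : List String :=
  pyFill SHORT_PROMPTS (by simp [SHORT_PROMPTS]) short_count []
    ++ pyFill MEDIUM_PROMPTS (by simp [MEDIUM_PROMPTS]) medium_count []
    ++ pyFill LONG_PROMPTS (by simp [LONG_PROMPTS]) long_count []

-- ===== PRECONDITION & SPEC =====
def Spec_get_synthetic_prompts (short_count : Int) (medium_count : Int) (long_count : Int) (out : List String) : Prop := out = get_synthetic_prompts_alt short_count medium_count long_count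
instance (short_count : Int) (medium_count : Int) (long_count : Int) (out : List String) : Decidable (Spec_get_synthetic_prompts short_count medium_count long_count out) := by unfold Spec_get_synthetic_prompts; infer_instance

-- ===== CLAIM (what is proved, stated in full; the proofs are below) =====
def Claim_equal_get_synthetic_prompts : Prop := ∀ (short_count : Int) (medium_count : Int) (long_count : Int), Dom_get_synthetic_prompts short_count medium_count long_count → Spec_get_synthetic_prompts short_count medium_count long_count (get_synthetic_prompts short_count medium_count long_count)

-- ===== LEMMAS AND PROOFS =====

-- normal form of a cyclically filled section, used on both sides
def cycN (pool : List String) (m : Nat) : List String :=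
  (List.range m).map (fun i => pool.getD (i % pool.length) "")

theorem cycN_chunk (pool : List String) (m : Nat) (h : pool.length ≤ m) :
    cycN pool m = pool ++ cycN pool (m - pool.length) := by
  unfold cycN
  have hm : m = pool.length + (m - pool.length) := by omega
  rw [hm, List.range_add, List.map_append, List.map_map, Nat.add_sub_cancel_left]
  congr 1
  · apply List.ext_getElem (by simp)
    intro i h1 h2
    simp at h1
    simp [Nat.mod_eq_of_lt h1, List.getD, List.getElem?_eq_getElem h1]
  · apply List.map_congr_left
    intro k _
    simp [Nat.add_mod_left]

theorem cycN_small (pool : List String) (m : Nat) (h : m ≤ pool.length) :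
    cycN pool m = pool.take m := by
  unfold cycN
  apply List.ext_getElem (by simp; omega)
  intro i h1 h2
  simp at h1
  have : i < pool.length := by omega
  simp [Nat.mod_eq_of_lt this, List.getD, List.getElem?_eq_getElem this]

-- the while-loop invariant: pyFill appends exactly the remaining cyclic section
theorem pyFill_spec (pool : List String) (hp : pool ≠ []) (count : Int) (out : List String) :
    pyFill pool hp count out = out ++ cycN pool (count - (out.length : Int)).toNat := by
  have hL : 0 < pool.length := List.length_pos_of_ne_nil hp
  generalize hfuel : (count - (out.length : Int)).toNat = fuel
  induction fuel using Nat.strong_induction_on generalizing out with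
  | _ fuel ih =>
  rw [pyFill]
  split
  · next hfit =>
    have hrec := ih ((count - ((out ++ pool).length : Int)).toNat)
      (by simp only [List.length_append]; omega) (out ++ pool) rfl
    rw [hrec, ← hfuel]
    have hchunk := cycN_chunk pool (count - (out.length : Int)).toNat (by omega)
    rw [hchunk]
    simp only [List.append_assoc, List.length_append]
    congr 3
    push_cast
    omega
  · next hfit =>
    split
    · next hpos =>
      rw [show PySem.List.slice pool none (some (count - (out.length : Int)))
            = pool.take (count - (out.length : Int)).toNat from
          PySem.List.slice_to _ (by omega), ← hfuel]
      congr 1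
      rw [cycN_small pool _ (by omega)]
    · next hpos =>
      have : (count - (out.length : Int)).toNat = 0 := by omega
      rw [← hfuel, this]
      simp [cycN]

-- A's per-element modulo map equals the cyclic normal form
theorem map_mod_eq_cycN (pool : List String) (hp : pool ≠ []) (n : Int) :
    (PySem.List.pyRange 0 n 1).map
      (fun i => PySem.List.pyGetD pool (PySem.Int.mod i (PySem.List.len pool)) "") = cycN pool n.toNat := by
  have hL : 0 < pool.length := List.length_pos_of_ne_nil hp
  rw [PySem.List.pyRange_one, List.map_map]
  unfold cycN
  have hn : (n - 0).toNat = n.toNat := by omega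
  rw [hn]
  apply List.map_congr_left
  intro k hk
  simp only [Function.comp_apply, zero_add]
  have h1 : PySem.Int.mod (k : Int) (PySem.List.len pool) = ((k % pool.length : Nat) : Int) := by
    simp [PySem.List.len_eq]
  rw [h1, PySem.List.pyGetD_natCast]

-- one section of A equals one pyFill of B
theorem section_eq (pool : List String) (hp : pool ≠ []) (n : Int) (acc : List String) :
    (PySem.List.pyRange 0 n 1).foldl
      (fun a i => a ++ [PySem.List.pyGetD pool (PySem.Int.mod i (PySem.List.len pool)) ""]) acc
    = acc ++ pyFill pool hp n [] := by
  rw [PySem.List.foldl_append_singleton_eq_map, map_mod_eq_cycN pool hp n,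
    pyFill_spec pool hp n []]
  simp

-- ===== VERDICT (by name: the statement is the Claim_ definition above) =====
theorem get_synthetic_prompts_spec : Claim_equal_get_synthetic_prompts := by
  intro s m l _
  unfold Spec_get_synthetic_prompts get_synthetic_prompts get_synthetic_prompts_alt
  dsimp only []
  rw [section_eq SHORT_PROMPTS (by simp [SHORT_PROMPTS]) s,
      section_eq MEDIUM_PROMPTS (by simp [MEDIUM_PROMPTS]) m,
      section_eq LONG_PROMPTS (by simp [LONG_PROMPTS]) l]
  simp
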